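-- pv_equiv track=rewrite | github.com/ron-wettenstein/TreeBranchMarks | treebranchmarks/tree_algs/woodelf_AAAI.py | get_feature_repetition_sequence
-- ===== SOURCE A (Python) =====
-- from typing import Union, Dict, Optional, Tuple, Set, List
--
-- def get_feature_repetition_sequence(features_in_path: List[str]):
--     """
--     Generate the feature repetition sequence.
--     The math is simple, the feature at index i is replaced by i
--     unless it appeared before in the sequance, in that case it will be represented by the index it already received.
--
--     Examples:
--     ["sex", "pluse", "age", "weight", "heart_rate", "sugar_in_blood"] => [1, 2, 3, 4, 5, 6]
--     ["weight", "pluse", "age", "sex", "pluse", "sex"] => [1, 2, 3, 4, 2, 4]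
--     """
--     feature_to_index = {}
--     frs = []
--     for i, feature in enumerate(features_in_path):
--         if feature in feature_to_index:
--             frs.append(feature_to_index[feature])
--         else:
--             feature_to_index[feature] = i
--             frs.append(i)
--
--     return frs
-- ===== SOURCE B (Python) =====
-- def get_feature_repetition_sequence(features_in_path):
--     # Group-then-scatter: collect the positions of each feature, then fill a
--     # preallocated result by writing each group's first position at all of its positions.
--     positions = {}
--     for i, f in enumerate(features_in_path):
--         positions.setdefault(f, []).append(i)
--     frs = [0] * len(features_in_path)
--     for ps in positions.values():
--         first = ps[0]
--         for p in ps: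
--             frs[p] = first
--     return frs
-- ===== Notes on version B (the rewrite author's own statement) =====
-- stated objective: alternative
-- what changed: Replaces A's single streaming pass (dict of first indices, result built by conditional appends) with a group-then-scatter scheme: one pass groups all positions by feature, then a preallocated result array is filled by random-access writes of each group's first position.
import Mathlib
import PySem

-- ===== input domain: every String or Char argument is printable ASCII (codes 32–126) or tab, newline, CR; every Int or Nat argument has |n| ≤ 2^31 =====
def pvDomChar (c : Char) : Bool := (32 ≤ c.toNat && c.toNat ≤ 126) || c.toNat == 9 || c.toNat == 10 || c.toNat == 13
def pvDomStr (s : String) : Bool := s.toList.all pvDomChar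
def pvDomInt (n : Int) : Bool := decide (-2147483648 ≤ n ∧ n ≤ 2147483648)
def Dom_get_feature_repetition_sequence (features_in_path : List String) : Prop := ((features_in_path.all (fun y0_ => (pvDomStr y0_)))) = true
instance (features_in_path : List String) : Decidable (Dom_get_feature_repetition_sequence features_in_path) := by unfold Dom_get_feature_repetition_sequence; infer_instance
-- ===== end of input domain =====

-- B replaces A's single streaming pass (dict of first indices + conditional appends) with a
-- group-then-scatter scheme: group all positions by feature, then scatter each group's first
-- position into a preallocated result by random-access writes. Alternative algorithm, same cost.

-- ===== PORT A =====
-- for i, feature in enumerate(features_in_path): if feature in dict: append dict[feature] else: dict[feature]=i; append i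
def get_feature_repetition_sequence (features_in_path : List String) : List Int :=
  ((PySem.List.enumerate features_in_path).foldl
    (fun (st : PySem.Dict String Int × List Int) (p : Int × String) =>
      if st.1.contains p.2 then
        (st.1, st.2 ++ [(st.1.get? p.2).getD 0])   -- getD 0 unreachable: contains guarantees some
      else
        (st.1.insert p.2 p.1, st.2 ++ [p.1]))
    (PySem.Dict.empty, [])).2

-- ===== PORT B =====
-- positions = {}; for i, f in enumerate(xs): positions.setdefault(f, []).append(i)
-- frs = [0]*len(xs); for ps in positions.values(): first = ps[0]; for p in ps: frs[p] = first
def get_feature_repetition_sequence_alt (features_in_path : List String) : List Int :=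
  let positions := (PySem.List.enumerate features_in_path).foldl
    (fun (d : PySem.Dict String (List Int)) p => d.modify p.2 [] (· ++ [p.1]))
    PySem.Dict.empty
  positions.values.foldl
    (fun frs ps =>
      let first := (PySem.List.pyGet? ps 0).getD 0   -- ps[0]; getD 0 unreachable: groups are nonempty
      ps.foldl (fun frs p => PySem.List.pySetD frs p first) frs)
    (List.replicate features_in_path.length (0 : Int))

-- ===== PRECONDITION & SPEC =====
def Spec_get_feature_repetition_sequence (features_in_path : List String) (out : List Int) : Prop := out = get_feature_repetition_sequence_alt features_in_path
instance (features_in_path : List String) (out : List Int) : Decidable (Spec_get_feature_repetition_sequence features_in_path out) := by unfold Spec_get_feature_repetition_sequence; infer_instance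

-- ===== CLAIM (what is proved, stated in full; the proofs are below) =====
def Claim_equal_get_feature_repetition_sequence : Prop := ∀ (features_in_path : List String), Dom_get_feature_repetition_sequence features_in_path → Spec_get_feature_repetition_sequence features_in_path (get_feature_repetition_sequence features_in_path)

-- ===== LEMMAS AND PROOFS =====

-- The canonical description both ports are reduced to: element i ↦ first index of xs[i] in xs.
def pvFirstIdx (xs : List String) : List Int :=
  xs.map (fun f => (((PySem.List.index? xs f).getD 0 : Nat) : Int))

-- ---------- A = pvFirstIdx ----------

-- Loop invariant for A: if the dict holds exactly the first-occurrence indices of the processed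
-- prefix `pre`, then folding the remaining suffix appends the first-occurrence values for it.
theorem frs_loop (suf : List String) : ∀ (pre : List String) (acc : List Int)
    (d : PySem.Dict String Int)
    (_hd : ∀ g, d.get? g = (PySem.List.index? pre g).map (fun n => (n : Int))),
    ((PySem.List.enumerate suf (pre.length : Int)).foldl
      (fun (st : PySem.Dict String Int × List Int) (p : Int × String) =>
        if st.1.contains p.2 then (st.1, st.2 ++ [(st.1.get? p.2).getD 0])
        else (st.1.insert p.2 p.1, st.2 ++ [p.1]))
      (d, acc)).2
    = acc ++ suf.map (fun f => (((PySem.List.index? (pre ++ suf) f).getD 0 : Nat) : Int)) := by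
  induction suf with
  | nil => intro pre acc d _; simp [PySem.List.enumerate_nil]
  | cons f rest ih =>
    intro pre acc d hd
    rw [PySem.List.enumerate_cons, List.foldl_cons]
    have hcont : d.contains f = (d.get? f).isSome := PySem.Dict.contains_eq_isSome_get? d f
    have hcat : pre ++ [f] ++ rest = pre ++ f :: rest := by simp
    by_cases hf : f ∈ pre
    · -- feature seen before: dict unchanged, append stored first index
      obtain ⟨k, hk⟩ := Option.isSome_iff_exists.1 ((PySem.List.index?_isSome_iff pre f).2 hf)
      have hget : d.get? f = some (k : Int) := by rw [hd, hk]; rfl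
      have hc : d.contains f = true := by rw [hcont, hget]; rfl
      simp only [hc, if_pos, hget]
      have hpre1 : ∀ g, d.get? g = (PySem.List.index? (pre ++ [f]) g).map (fun n => (n : Int)) := by
        intro g
        by_cases hg : g ∈ pre
        · rw [hd, PySem.List.index?_append_of_mem [f] hg]
        · have hgf : g ∉ pre ++ [f] := by
            intro hmem
            rcases List.mem_append.1 hmem with h | h
            · exact hg h
            · simp at h; subst h; exact hg hf
          rw [hd, (PySem.List.index?_eq_none_iff pre g).2 hg,
              (PySem.List.index?_eq_none_iff (pre ++ [f]) g).2 hgf]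
      have hrec := ih (pre ++ [f]) (acc ++ [(some ((k : Nat) : Int)).getD 0]) d hpre1
      simp only [List.length_append, List.length_singleton] at hrec
      push_cast at hrec
      rw [hcat] at hrec
      rw [hrec]
      have hidx : PySem.List.index? (pre ++ f :: rest) f = some k := by
        rw [← hcat, PySem.List.index?_append_of_mem rest (by simp : f ∈ pre ++ [f]),
            PySem.List.index?_append_of_mem [f] hf, hk]
      rw [PySem.List.index?_eq_idxOf?] at hidx
      simp [hidx, List.append_assoc]
    · -- new feature: insert first index, append position
      have hget : d.get? f = none := by
        rw [hd, (PySem.List.index?_eq_none_iff pre f).2 hf]; rfl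
      have hc : d.contains f = false := by rw [hcont, hget]; rfl
      simp only [hc, Bool.false_eq_true, if_false]
      have hpre1 : ∀ g, (d.insert f (pre.length : Int)).get? g
          = (PySem.List.index? (pre ++ [f]) g).map (fun n => (n : Int)) := by
        intro g
        by_cases hgf : g = f
        · subst hgf
          rw [PySem.Dict.get?_insert_self, PySem.List.index?_append_singleton_self pre g hf]
          rfl
        · rw [PySem.Dict.get?_insert_of_ne d _ hgf, hd]
          by_cases hg : g ∈ pre
          · rw [PySem.List.index?_append_of_mem [f] hg]
          · have hgf2 : g ∉ pre ++ [f] := by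
              intro hmem
              rcases List.mem_append.1 hmem with h | h
              · exact hg h
              · simp at h; exact hgf h
            rw [(PySem.List.index?_eq_none_iff pre g).2 hg,
                (PySem.List.index?_eq_none_iff (pre ++ [f]) g).2 hgf2]
      have hrec := ih (pre ++ [f]) (acc ++ [(pre.length : Int)]) (d.insert f (pre.length : Int)) hpre1
      simp only [List.length_append, List.length_singleton] at hrec
      push_cast at hrec
      rw [hcat] at hrec
      rw [hrec]
      have hidx : PySem.List.index? (pre ++ f :: rest) f = some pre.length := by
        rw [← hcat, PySem.List.index?_append_of_mem rest (by simp : f ∈ pre ++ [f]),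
            PySem.List.index?_append_singleton_self pre f hf]
      rw [PySem.List.index?_eq_idxOf?] at hidx
      simp [hidx, List.append_assoc]

theorem a_eq_firstIdx (xs : List String) :
    get_feature_repetition_sequence xs = pvFirstIdx xs := by
  unfold get_feature_repetition_sequence pvFirstIdx
  have h := frs_loop xs [] [] PySem.Dict.empty
    (by intro g; simp [PySem.Dict.get?_empty, PySem.List.index?_eq_idxOf?])
  simpa using h

-- ---------- B = pvFirstIdx ----------

-- The grouping dict: lookup at f yields the positions of f in the enumerated list.
theorem groups_getD (l : List (Int × String)) (d : PySem.Dict String (List Int)) (c : String) :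
    (l.foldl (fun d p => d.modify p.2 [] (· ++ [p.1])) d).getD c []
      = d.getD c [] ++ (l.filter (fun p => p.2 == c)).map (·.1) := by
  have h := PySem.Dict.getD_foldl_modify_append (l.map Prod.swap) d c
  rw [List.foldl_map] at h
  simpa [List.filter_map, Function.comp_def] using h

theorem groups_keys (l : List (Int × String)) :
    (l.foldl (fun (d : PySem.Dict String (List Int)) p => d.modify p.2 [] (· ++ [p.1]))
      PySem.Dict.empty).keys = PySem.Set.ofList (l.map (·.2)) := by
  rw [PySem.Dict.keys_foldl_modify_key]
  simp [PySem.Set.ofList_eq_foldl, PySem.Set.update, PySem.Dict.keys_empty]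

theorem groups_nodup_keys (l : List (Int × String)) :
    (l.foldl (fun (d : PySem.Dict String (List Int)) p => d.modify p.2 [] (· ++ [p.1]))
      PySem.Dict.empty).keys.Nodup :=
  PySem.Dict.nodup_keys_foldl_modify_key l (·.2) [] (fun _ x => (· ++ [x.1])) _
    (by simp [PySem.Dict.keys_empty])

-- Head of a position group = first occurrence index (shifted by the enumeration start).
theorem head_group (xs : List String) : ∀ (s : Int) (f : String),
    ((((PySem.List.enumerate xs s).filter (fun p => p.2 == f)).map (·.1)).head?)
      = (PySem.List.index? xs f).map (fun k => s + (k : Int)) := by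
  induction xs with
  | nil => intro s f; simp [PySem.List.enumerate_nil, PySem.List.index?_eq_idxOf?]
  | cons x xs ih =>
    intro s f
    rw [PySem.List.enumerate_cons]
    by_cases hx : x = f
    · subst hx
      simp [PySem.List.index?_eq_idxOf?, List.idxOf?_cons]
    · have hxb : (x == f) = false := by simp [hx]
      simp only [List.filter_cons, hxb, Bool.false_eq_true, if_false]
      rw [ih (s + 1) f]
      rw [PySem.List.index?_eq_idxOf?, PySem.List.index?_eq_idxOf?, List.idxOf?_cons]
      simp only [hxb, Bool.false_eq_true, if_false]
      cases List.idxOf? f xs with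
      | none => rfl
      | some k => simp [Option.map_some]; ring

-- Membership in a position group.
theorem mem_group (xs : List String) (f : String) (q : Int) :
    q ∈ (((PySem.List.enumerate xs 0).filter (fun p => p.2 == f)).map (·.1))
      ↔ ∃ (k : Nat), ∃ (h : k < xs.length), q = (k : Int) ∧ xs[k] = f := by
  simp only [List.mem_map, List.mem_filter, PySem.List.mem_enumerate_iff]
  constructor
  · rintro ⟨p, ⟨⟨k, hk, rfl⟩, hpf⟩, rfl⟩
    exact ⟨k, hk, by simp, by simpa using hpf⟩
  · rintro ⟨k, hk, rfl, rfl⟩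
    exact ⟨((0 : Int) + (k : Int), xs[k]), ⟨⟨k, hk, rfl⟩, by simp⟩, by simp⟩

-- Inner scatter loop: writes value c at every position of g, leaves the rest.
theorem inner_scatter_length (g : List Int) (c : Int) : ∀ (fr : List Int),
    (g.foldl (fun fr p => PySem.List.pySetD fr p c) fr).length = fr.length := by
  induction g with
  | nil => intro fr; rfl
  | cons p g ih => intro fr; simp [ih, PySem.List.length_pySetD]

theorem inner_scatter (g : List Int) (c : Int) : ∀ (fr : List Int),
    (∀ p ∈ g, 0 ≤ p ∧ p < (fr.length : Int)) → ∀ (i : Nat) (d : Int),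
    PySem.List.pyGetD (g.foldl (fun fr p => PySem.List.pySetD fr p c) fr) (i : Int) d
      = if (i : Int) ∈ g then c else PySem.List.pyGetD fr (i : Int) d := by
  induction g with
  | nil => intro fr _ i d; simp
  | cons p g ih =>
    intro fr hb i d
    obtain ⟨hp0, hpl⟩ := hb p (List.mem_cons_self)
    have hk : p = ((p.toNat : Nat) : Int) := (Int.toNat_of_nonneg hp0).symm
    have hkl : p.toNat < fr.length := by omega
    rw [List.foldl_cons]
    have hb' : ∀ q ∈ g, 0 ≤ q ∧ q < ((PySem.List.pySetD fr p c).length : Int) := by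
      intro q hq; rw [PySem.List.length_pySetD]; exact hb q (List.mem_cons_of_mem _ hq)
    rw [ih _ hb' i d]
    have hset := PySem.List.pyGetD_pySetD_natCast fr p.toNat i c d hkl
    rw [← hk] at hset
    rw [hset]
    by_cases hig : (i : Int) ∈ g
    · simp [hig]
    · by_cases hik : i = p.toNat
      · have hip : (i : Int) = p := by omega
        rw [if_neg hig, if_pos hik, if_pos (List.mem_cons.2 (Or.inl hip))]
      · have hni : ((i : Int)) ∉ p :: g := by
          intro hmem
          rcases List.mem_cons.1 hmem with h | h
          · exact hik (by omega)
          · exact hig h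
        rw [if_neg hig, if_neg hik, if_neg hni]

-- Outer scatter loop over disjoint groups: position i receives the write value of the
-- (unique) group containing it, and is untouched otherwise.
theorem outer_scatter_length (gs : List (List Int)) : ∀ (fr : List Int),
    (gs.foldl (fun fr ps => ps.foldl
        (fun fr p => PySem.List.pySetD fr p ((PySem.List.pyGet? ps 0).getD 0)) fr) fr).length
      = fr.length := by
  induction gs with
  | nil => intro fr; rfl
  | cons g gs ih => intro fr; rw [List.foldl_cons, ih, inner_scatter_length]

theorem outer_scatter (gs : List (List Int)) : ∀ (fr : List Int),
    (∀ g ∈ gs, ∀ p ∈ g, 0 ≤ p ∧ p < (fr.length : Int)) →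
    gs.Pairwise (fun a b => ∀ x, x ∈ a → x ∉ b) →
    ∀ (i : Nat) (d : Int),
    PySem.List.pyGetD
      (gs.foldl (fun fr ps => ps.foldl
        (fun fr p => PySem.List.pySetD fr p ((PySem.List.pyGet? ps 0).getD 0)) fr) fr) (i : Int) d
      = match gs.find? (fun g => g.contains (i : Int)) with
        | some g => (PySem.List.pyGet? g 0).getD 0
        | none => PySem.List.pyGetD fr (i : Int) d := by
  induction gs with
  | nil => intro fr _ _ i d; simp
  | cons g gs ih =>
    intro fr hb hp i d
    rw [List.foldl_cons]
    have hb' : ∀ g' ∈ gs, ∀ p ∈ g', 0 ≤ p ∧ p <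
        (((g.foldl (fun fr p => PySem.List.pySetD fr p ((PySem.List.pyGet? g 0).getD 0)) fr)).length : Int) := by
      intro g' hg' p hpmem
      rw [inner_scatter_length]
      exact hb g' (List.mem_cons_of_mem _ hg') p hpmem
    rw [ih _ hb' (List.Pairwise.sublist (List.sublist_cons_self g gs) hp) i d]
    by_cases hig : (i : Int) ∈ g
    · have hfc : List.find? (fun g => g.contains (i : Int)) (g :: gs) = some g :=
        List.find?_cons_of_pos (by simpa using hig)
      rw [hfc]
      have hnone : gs.find? (fun g => g.contains (i : Int)) = none := by
        rw [List.find?_eq_none]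
        intro g' hg' hc
        exact (List.rel_of_pairwise_cons hp hg') (i : Int) hig (by simpa using hc)
      rw [hnone]
      rw [inner_scatter g _ fr (hb g List.mem_cons_self) i d]
      simp [hig]
    · have hfc : List.find? (fun g => g.contains (i : Int)) (g :: gs)
          = List.find? (fun g => g.contains (i : Int)) gs :=
        List.find?_cons_of_neg (by simpa using hig)
      rw [hfc]
      cases hfind : gs.find? (fun g => g.contains (i : Int)) with
      | some g' => rfl
      | none =>
        rw [inner_scatter g _ fr (hb g List.mem_cons_self) i d]
        simp [hig]

theorem b_eq_firstIdx (xs : List String) :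
    get_feature_repetition_sequence_alt xs = pvFirstIdx xs := by
  simp only [get_feature_repetition_sequence_alt]
  set l := PySem.List.enumerate xs (0 : Int) with hl
  set grp : String → List Int := fun f => ((l.filter (fun p => p.2 == f)).map (·.1)) with hgrp
  set d0 := l.foldl (fun (d : PySem.Dict String (List Int)) p => d.modify p.2 [] (· ++ [p.1]))
    PySem.Dict.empty with hd0
  -- values of the grouping dict = groups of the distinct features, in first-occurrence order
  have hkeys : d0.keys = PySem.Set.ofList xs := by
    rw [hd0, groups_keys]; congr 1; exact PySem.List.map_snd_enumerate xs 0
  have hvals : d0.values = (PySem.Set.ofList xs).map grp := by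
    rw [PySem.Dict.values_eq_map_keys d0 (hd0 ▸ groups_nodup_keys l) [], hkeys]
    refine List.map_congr_left (fun f _ => ?_)
    rw [hd0, groups_getD]
    simp [hgrp, PySem.Dict.getD_empty]
  rw [hvals]
  -- group membership, bounds, disjointness
  have hmem : ∀ f q, q ∈ grp f ↔ ∃ (k : Nat), ∃ (h : k < xs.length), q = (k : Int) ∧ xs[k] = f := by
    intro f q; exact mem_group xs f q
  have hbounds : ∀ g ∈ (PySem.Set.ofList xs).map grp, ∀ p ∈ g,
      0 ≤ p ∧ p < ((List.replicate xs.length (0 : Int)).length : Int) := by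
    intro g hg p hp
    obtain ⟨f, _, rfl⟩ := List.mem_map.1 hg
    obtain ⟨k, hk, rfl, _⟩ := (hmem f p).1 hp
    simp; omega
  have hdisj : ((PySem.Set.ofList xs).map grp).Pairwise (fun a b => ∀ x, x ∈ a → x ∉ b) := by
    rw [List.pairwise_map]
    refine (PySem.Set.nodup_ofList xs).imp ?_
    intro f f' hne x hxf hxf'
    obtain ⟨k, hk, rfl, hkf⟩ := (hmem f _).1 hxf
    obtain ⟨k', hk', hkk', hkf'⟩ := (hmem f' _).1 hxf'
    have hkk : k = k' := by exact_mod_cast hkk'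
    subst hkk
    exact hne (hkf.symm.trans hkf')
  -- pointwise value of the scatter result
  apply List.ext_getElem
  · rw [outer_scatter_length, List.length_replicate]; simp [pvFirstIdx]
  intro i hi1 hi2
  have hn : i < xs.length := by
    simpa [outer_scatter_length, List.length_replicate] using hi1
  have hgetD := outer_scatter ((PySem.Set.ofList xs).map grp) (List.replicate xs.length (0 : Int))
    hbounds hdisj i 0
  -- the unique group containing i is grp xs[i]
  have higrp : (i : Int) ∈ grp (xs[i]'hn) := (hmem _ _).2 ⟨i, hn, rfl, rfl⟩
  have hself : grp (xs[i]'hn) ∈ (PySem.Set.ofList xs).map grp :=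
    List.mem_map_of_mem ((PySem.Set.mem_ofList xs _).2 (xs.getElem_mem hn))
  have hfind : ((PySem.Set.ofList xs).map grp).find? (fun g => g.contains (i : Int))
      = some (grp (xs[i]'hn)) := by
    cases hf : ((PySem.Set.ofList xs).map grp).find? (fun g => g.contains (i : Int)) with
    | none =>
      exact absurd (by simpa using higrp)
        (by simpa using List.find?_eq_none.1 hf _ hself)
    | some g =>
      obtain ⟨f, _, rfl⟩ := List.mem_map.1 (List.mem_of_find?_eq_some hf)
      have hig : (i : Int) ∈ grp f := by simpa using List.find?_some hf
      obtain ⟨k, hk, hki, hkf⟩ := (hmem f _).1 hig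
      have hki' : k = i := by exact_mod_cast hki.symm
      subst hki'
      rw [← hkf]
  rw [hfind] at hgetD
  -- the written value is the first-occurrence index of xs[i]
  obtain ⟨k0, hk0⟩ := Option.isSome_iff_exists.1
    ((PySem.List.index?_isSome_iff xs (xs[i]'hn)).2 (xs.getElem_mem hn))
  have hhead : (grp (xs[i]'hn)).head? = some ((k0 : Int)) := by
    rw [hgrp]
    have := head_group xs 0 (xs[i]'hn)
    rw [hl] at *
    rw [this, hk0]
    simp
  have hval : (PySem.List.pyGet? (grp (xs[i]'hn)) (0 : Int)).getD 0 = (k0 : Int) := by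
    have h0 : (0 : Int) = ((0 : Nat) : Int) := rfl
    rw [h0, PySem.List.pyGet?_natCast]
    rw [← List.head?_eq_getElem?, hhead]
    rfl
  simp only [hval] at hgetD
  rw [PySem.List.pyGetD_eq_getElem _ 0 (by exact_mod_cast Nat.zero_le i)
    (by rw [outer_scatter_length, List.length_replicate]; exact_mod_cast hn)] at hgetD
  simp only [Int.toNat_natCast] at hgetD
  rw [hgetD]
  rw [PySem.List.index?_eq_idxOf?] at hk0
  simp [pvFirstIdx, hk0]

-- ===== VERDICT (by name: the statement is the Claim_ definition above) =====
theorem get_feature_repetition_sequence_spec : Claim_equal_get_feature_repetition_sequence := by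
  intro xs _
  unfold Spec_get_feature_repetition_sequence
  rw [a_eq_firstIdx, b_eq_firstIdx]
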